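-- pv_equiv track=rewrite | github.com/Kandeel4411/peam-backend | src/core/management/commands/test_plagiarism.py | tokenize_source
-- ===== SOURCE A (Python) =====
-- def tokenize_source(old_source, new_source, marker="@", start_token="{{", end_token="}}"):
--     tokenized_source = ""
--     word_start = False
--     for old_ch, new_ch in zip(old_source, new_source):
--         if new_ch == marker and new_ch != old_ch:
--             if not word_start:
--                 tokenized_source += "{{"
--                 word_start = True
--         else:
--             if word_start:
--                 tokenized_source += "}}"
--                 word_start = False
--         tokenized_source += old_ch
--
--     if word_start:
--         tokenized_source += "}}"
--     return tokenized_source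
-- ===== SOURCE B (Python) =====
-- from itertools import groupby
--
--
-- def tokenize_source(old_source, new_source, marker="@", start_token="{{", end_token="}}"):
--     marked = ((new_ch == marker and new_ch != old_ch, old_ch)
--               for old_ch, new_ch in zip(old_source, new_source))
--     parts = []
--     for flag, group in groupby(marked, key=lambda pair: pair[0]):
--         run = "".join(old_ch for _, old_ch in group)
--         parts.append("{{" + run + "}}" if flag else run)
--     return "".join(parts)
-- ===== Notes on version B (the rewrite author's own statement) =====
-- stated objective: alternative
-- what changed: Replaced the per-character word_start state machine with a two-stage pass: compute a mark flag per aligned character pair, then group maximal consecutive runs with itertools.groupby and wrap each marked run in '{{'/'}}' at once (start_token/end_token stay unused, as in A).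
import Mathlib
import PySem

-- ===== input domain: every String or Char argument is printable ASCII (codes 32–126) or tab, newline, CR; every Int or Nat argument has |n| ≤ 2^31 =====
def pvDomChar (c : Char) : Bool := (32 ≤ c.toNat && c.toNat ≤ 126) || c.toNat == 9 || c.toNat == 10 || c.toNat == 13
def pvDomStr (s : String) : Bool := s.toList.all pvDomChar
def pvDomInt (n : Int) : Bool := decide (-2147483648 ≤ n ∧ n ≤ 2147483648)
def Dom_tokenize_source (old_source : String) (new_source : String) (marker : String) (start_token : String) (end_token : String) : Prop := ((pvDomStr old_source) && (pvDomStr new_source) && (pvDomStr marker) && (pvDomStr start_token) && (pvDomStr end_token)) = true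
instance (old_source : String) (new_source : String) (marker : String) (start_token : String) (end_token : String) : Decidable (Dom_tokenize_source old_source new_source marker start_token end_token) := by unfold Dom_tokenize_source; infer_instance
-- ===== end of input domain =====

-- B replaces A's per-character word_start state machine by marking each pair and
-- grouping maximal runs with groupby (alternative decomposition, same cost);
-- like A, B hard-codes "{{"/"}}" and leaves start_token/end_token unused.

-- ===== PORT A =====
-- the for-loop over zip(old_source, new_source), carrying (tokenized_source, word_start)
def tsLoopA (marker : String) : List (Char × Char) → List Char → Bool → List Char × Bool
  | [], acc, ws => (acc, ws)
  | (old_ch, new_ch) :: rest, acc, ws =>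
    if (String.mk [new_ch] == marker) && (new_ch != old_ch) then
      let st := if !ws then (acc ++ ['{', '{'], true) else (acc, ws)
      tsLoopA marker rest (st.1 ++ [old_ch]) st.2
    else
      let st := if ws then (acc ++ ['}', '}'], false) else (acc, ws)
      tsLoopA marker rest (st.1 ++ [old_ch]) st.2

def tokenize_source (old_source : String) (new_source : String) (marker : String) (start_token : String) (end_token : String) : String :=
  let r := tsLoopA marker (old_source.toList.zip new_source.toList) [] false
  if r.2 then String.mk (r.1 ++ ['}', '}']) else String.mk r.1

-- ===== PORT B =====
-- itertools.groupby over the marked sequence: maximal runs of equal flag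
def pvRuns : List (Bool × Char) → List (Bool × List Char)
  | [] => []
  | (f, c) :: rest =>
    match pvRuns rest with
    | [] => [(f, [c])]
    | (g, cs) :: gs => if f == g then (f, c :: cs) :: gs else (f, [c]) :: (g, cs) :: gs

def tokenize_source_alt (old_source : String) (new_source : String) (marker : String) (start_token : String) (end_token : String) : String :=
  let marked := (old_source.toList.zip new_source.toList).map
      (fun p => (((String.mk [p.2] == marker) && (p.2 != p.1)), p.1))
  let parts := (pvRuns marked).map
      (fun g => if g.1 then '{' :: '{' :: g.2 ++ ['}', '}'] else g.2)
  String.mk parts.flatten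

-- ===== PRECONDITION & SPEC =====
def Spec_tokenize_source (old_source : String) (new_source : String) (marker : String) (start_token : String) (end_token : String) (out : String) : Prop := out = tokenize_source_alt old_source new_source marker start_token end_token
instance (old_source : String) (new_source : String) (marker : String) (start_token : String) (end_token : String) (out : String) : Decidable (Spec_tokenize_source old_source new_source marker start_token end_token out) := by unfold Spec_tokenize_source; infer_instance

-- ===== CLAIM (what is proved, stated in full; the proofs are below) =====
def Claim_equal_tokenize_source : Prop := ∀ (old_source : String) (new_source : String) (marker : String) (start_token : String) (end_token : String), Dom_tokenize_source old_source new_source marker start_token end_token → Spec_tokenize_source old_source new_source marker start_token end_token (tokenize_source old_source new_source marker start_token end_token)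

-- ===== LEMMAS AND PROOFS =====

-- what A's loop still has to emit from state ws, over the marked sequence
def tsRend : Bool → List (Bool × Char) → List Char
  | ws, [] => if ws then ['}', '}'] else []
  | ws, (f, c) :: rest =>
    if f then (if !ws then ['{', '{'] else []) ++ c :: tsRend true rest
    else (if ws then ['}', '}'] else []) ++ c :: tsRend false rest

def tsWrap (g : Bool × List Char) : List Char :=
  if g.1 then '{' :: '{' :: g.2 ++ ['}', '}'] else g.2

def tsMark (marker : String) (p : Char × Char) : Bool × Char :=
  (((String.mk [p.2] == marker) && (p.2 != p.1)), p.1)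

theorem tsLoopA_rend (marker : String) (ps : List (Char × Char)) :
    ∀ (acc : List Char) (ws : Bool),
      (if (tsLoopA marker ps acc ws).2 then (tsLoopA marker ps acc ws).1 ++ ['}', '}']
       else (tsLoopA marker ps acc ws).1)
      = acc ++ tsRend ws (ps.map (tsMark marker)) := by
  induction ps with
  | nil => intro acc ws; cases ws <;> simp [tsLoopA, tsRend]
  | cons p rest ih =>
    intro acc ws
    obtain ⟨oc, nc⟩ := p
    by_cases hf : ((String.mk [nc] == marker) && (nc != oc)) = true <;>
      cases ws <;>
        simp [tsLoopA, tsRend, tsMark, hf, ih]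

theorem tsRend_runs (ms : List (Bool × Char)) :
    tsRend false ms = ((pvRuns ms).map tsWrap).flatten ∧
    tsRend true ms =
      (match pvRuns ms with
       | (true, cs) :: gs => cs ++ ['}', '}'] ++ (gs.map tsWrap).flatten
       | gs => ['}', '}'] ++ (gs.map tsWrap).flatten) := by
  induction ms with
  | nil => simp [tsRend, pvRuns]
  | cons p rest ih =>
    obtain ⟨f, c⟩ := p
    obtain ⟨ih0, ih1⟩ := ih
    rcases h : pvRuns rest with _ | ⟨⟨g, cs⟩, gs⟩
    · cases f <;> simp [tsRend, pvRuns, h, tsWrap, ih0, ih1]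
    · cases f <;> cases g <;> simp [tsRend, pvRuns, h, tsWrap, ih0, ih1]

-- ===== VERDICT (by name: the statement is the Claim_ definition above) =====
theorem tokenize_source_spec : Claim_equal_tokenize_source := by
  intro old_source new_source marker start_token end_token _
  unfold Spec_tokenize_source tokenize_source tokenize_source_alt
  have h := tsLoopA_rend marker (old_source.toList.zip new_source.toList) [] false
  have h2 := (tsRend_runs ((old_source.toList.zip new_source.toList).map (tsMark marker))).1
  simp only [List.nil_append] at h
  rcases ht : tsLoopA marker (old_source.toList.zip new_source.toList) [] false with ⟨a, w⟩
  rw [ht] at h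
  rw [h2] at h
  cases w <;> simp_all
  all_goals rfl
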